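-- pv_equiv track=rewrite | github.com/Woleek/Scrambler-project | server.py | scram_V34
-- ===== SOURCE A (Python) =====
-- from operator import xor
--
-- def async_clock(frame, data, bit):
--     if bit[1] != -1:  # Checking whether we use both bits required for some scramblers
--         temp = xor(frame[bit[0] - 1], frame[bit[1] - 1])  # XOR for bit[0] and bit[1]
--     else:  # If there is only 1 bit, value is assigned to this bit
--         temp = frame[bit[0] - 1]
--     frame.pop()  # Remove the last bit from the frame
--     xor_value = xor(temp, data)  # Feedback of input syganle and XOR values of frame bits
--     frame.insert(0, xor_value)  # Add XOR value at the beginning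
--     return xor_value  # Return result of the coded signal
--
-- def scram_V34(bits):
--     data_length = len(bits)
--     frame_V34 = [1, 0, 0, 1, 0, 0, 0, 1, 0, 0, 1, 0, 0, 0, 0, 1, 0, 1, 0, 1, 1, 0, 1]  # Synchronization frame for scrambler
--     scram_bits = [18, 23]  # Bits used in feedback - for V34 bit 18 and 23
--     output_signal = []  # Array for output data
--     for i in range(0, data_length):  # Iteration over the entire input array
--         clock_result = async_clock(frame_V34, bits[i], scram_bits)  # Perform clock operations for multiplicative scrambler
--         output_signal.append(clock_result)  # Add results to the output array
--     return output_signal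
-- ===== SOURCE B (Python) =====
-- def scram_V34(bits):
--     # Sliding-window view: out[i] = bits[i] XOR hist[i+5] XOR hist[i],
--     # where hist starts as the reversed sync frame and grows with each output bit.
--     full = [1, 0, 1, 1, 0, 1, 0, 1, 0, 0, 0, 0, 1, 0, 0, 1, 0, 0, 0, 1, 0, 0, 1]
--     out = []
--     for i, b in enumerate(bits):
--         v = b ^ full[i + 5] ^ full[i]
--         out.append(v)
--         full.append(v)
--     return out
-- ===== Notes on version B (the rewrite author's own statement) =====
-- stated objective: alternative
-- what changed: Replaces the mutable 23-bit shift register (pop from the end, insert at the front each clock) by a sliding window over an append-only history list seeded with the reversed sync frame, computing out[i] = bits[i] ^ hist[i+5] ^ hist[i] by plain indexing.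
import Mathlib
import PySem

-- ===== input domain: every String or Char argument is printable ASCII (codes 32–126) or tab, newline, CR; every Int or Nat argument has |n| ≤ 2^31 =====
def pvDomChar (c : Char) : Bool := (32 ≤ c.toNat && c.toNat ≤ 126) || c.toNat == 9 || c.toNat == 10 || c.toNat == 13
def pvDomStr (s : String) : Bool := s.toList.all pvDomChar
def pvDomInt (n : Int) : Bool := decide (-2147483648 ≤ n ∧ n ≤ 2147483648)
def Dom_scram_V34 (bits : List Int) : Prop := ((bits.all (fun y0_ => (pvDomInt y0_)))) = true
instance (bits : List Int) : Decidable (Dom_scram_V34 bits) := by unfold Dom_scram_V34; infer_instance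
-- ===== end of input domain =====

-- B replaces A's pop/insert shift register by a sliding window over the growing output
-- history (out[i] = bits[i] XOR hist[i+5] XOR hist[i], hist seeded with the reversed frame);
-- equal return values are proved; A mutates only a list it creates itself, so no observable
-- side effect differs.

-- ===== PORT A =====
-- async_clock(frame, data, bit): bit is the 2-element list [18, 23], ported as a pair.
-- frame always has length 23 here, so the pyGetD default 0 and dropLast (pop of a
-- non-empty list) are never-taken totality guards, not behaviour changes.
def async_clock (frame : List Int) (data : Int) (bit : Int × Int) : List Int × Int :=
  let temp :=
    if bit.2 ≠ -1 then
      PySem.Int.bxor (PySem.List.pyGetD frame (bit.1 - 1) 0) (PySem.List.pyGetD frame (bit.2 - 1) 0)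
    else
      PySem.List.pyGetD frame (bit.1 - 1) 0
  let frame' := frame.dropLast            -- frame.pop()
  let xor_value := PySem.Int.bxor temp data
  (xor_value :: frame', xor_value)        -- frame.insert(0, xor_value); return xor_value

-- one iteration of A's loop body: run the clock, append the result to output_signal
def scramStepA (st : List Int × List Int) (d : Int) : List Int × List Int :=
  let r := async_clock st.1 d (18, 23)    -- scram_bits = [18, 23]
  (r.1, st.2 ++ [r.2])

def scram_V34 (bits : List Int) : List Int :=
  -- frame_V34 literal; the loop `for i in range(0, data_length)` folds over bits
  (bits.foldl scramStepA
    ([1, 0, 0, 1, 0, 0, 0, 1, 0, 0, 1, 0, 0, 0, 0, 1, 0, 1, 0, 1, 1, 0, 1], [])).2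

-- ===== PORT B =====
-- one iteration of B's loop: state (i, out, full); v = b ^ full[i+5] ^ full[i]
def scramStepB (st : Nat × List Int × List Int) (b : Int) : Nat × List Int × List Int :=
  let v := PySem.Int.bxor (PySem.Int.bxor b (st.2.2.getD (st.1 + 5) 0)) (st.2.2.getD st.1 0)
  (st.1 + 1, st.2.1 ++ [v], st.2.2 ++ [v])

def scram_V34_alt (bits : List Int) : List Int :=
  -- full starts as the reversed sync frame and grows by one output bit per step
  ((bits.foldl scramStepB
    (0, [], [1, 0, 1, 1, 0, 1, 0, 1, 0, 0, 0, 0, 1, 0, 0, 1, 0, 0, 0, 1, 0, 0, 1])).2.1)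

-- ===== PRECONDITION & SPEC =====
def Spec_scram_V34 (bits : List Int) (out : List Int) : Prop := out = scram_V34_alt bits
instance (bits : List Int) (out : List Int) : Decidable (Spec_scram_V34 bits out) := by
  unfold Spec_scram_V34; infer_instance

-- ===== CLAIM (what is proved, stated in full; the proofs are below) =====
def Claim_equal_scram_V34 : Prop := ∀ (bits : List Int), Dom_scram_V34 bits → Spec_scram_V34 bits (scram_V34 bits)

-- ===== LEMMAS AND PROOFS =====

-- sign / magnitude view of PySem.Int.bxor, used to commute/associate XOR on Int
def pvSgn (a : Int) : Bool := decide (a < 0)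
def pvMag (a : Int) : Nat := if 0 ≤ a then a.toNat else (-a - 1).toNat
def pvDec (s : Bool) (m : Nat) : Int := if s then -(m : Int) - 1 else (m : Int)

lemma bxor_dec (a b : Int) :
    PySem.Int.bxor a b = pvDec (xor (pvSgn a) (pvSgn b)) (pvMag a ^^^ pvMag b) := by
  by_cases ha : 0 ≤ a <;> by_cases hb : 0 ≤ b <;>
    simp [PySem.Int.bxor, pvDec, pvSgn, pvMag, ha, hb, not_le.mp, show ¬ a < 0 ↔ 0 ≤ a by omega,
      show ¬ b < 0 ↔ 0 ≤ b by omega] <;> omega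

lemma sgn_dec (s : Bool) (m : Nat) : pvSgn (pvDec s m) = s := by
  cases s <;> simp [pvSgn, pvDec] <;> omega

lemma mag_dec (s : Bool) (m : Nat) : pvMag (pvDec s m) = m := by
  cases s <;> simp [pvMag, pvDec] <;> omega

lemma bxor_rotate (x y b : Int) :
    PySem.Int.bxor (PySem.Int.bxor x y) b = PySem.Int.bxor (PySem.Int.bxor b x) y := by
  rw [bxor_dec x y, bxor_dec b x, bxor_dec (pvDec (xor (pvSgn x) (pvSgn y)) (pvMag x ^^^ pvMag y)) b,
    bxor_dec (pvDec (xor (pvSgn b) (pvSgn x)) (pvMag b ^^^ pvMag x)) y,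
    sgn_dec, mag_dec, sgn_dec, mag_dec]
  congr 1
  · cases pvSgn x <;> cases pvSgn y <;> cases pvSgn b <;> rfl
  · calc (pvMag x ^^^ pvMag y) ^^^ pvMag b
        = pvMag x ^^^ (pvMag y ^^^ pvMag b) := Nat.xor_assoc ..
      _ = pvMag x ^^^ (pvMag b ^^^ pvMag y) := by rw [Nat.xor_comm (pvMag y) (pvMag b)]
      _ = (pvMag x ^^^ pvMag b) ^^^ pvMag y := (Nat.xor_assoc ..).symm
      _ = (pvMag b ^^^ pvMag x) ^^^ pvMag y := by rw [Nat.xor_comm (pvMag x) (pvMag b)]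

-- the loop invariant: A's frame is the reverse of the 23-element window of B's
-- history starting at position i
lemma loop_eq (bits : List Int) : ∀ (i : Nat) (L out : List Int),
    L.length = 23 + i →
    (bits.foldl scramStepA ((L.drop i).reverse, out)).2
      = (bits.foldl scramStepB (i, out, L)).2.1 := by
  induction bits with
  | nil => intro i L out _; rfl
  | cons b rest ih =>
    intro i L out hlen
    have h0 : i < L.length := by omega
    have h5 : i + 5 < L.length := by omega
    have hFlen : ((L.drop i).reverse).length = 23 := by
      rw [List.length_reverse, List.length_drop, hlen]; omega
    obtain ⟨v, hv⟩ : ∃ v, PySem.Int.bxor (PySem.Int.bxor b (L.getD (i + 5) 0)) (L.getD i 0) = v :=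
      ⟨_, rfl⟩
    have hget17 : PySem.List.pyGetD ((L.drop i).reverse) (18 - 1) 0 = L.getD (i + 5) 0 := by
      rw [show ((18 : Int) - 1) = ((17 : Nat) : Int) from by norm_num,
        PySem.List.pyGetD_natCast]
      rw [List.getD_eq_getElem ((L.drop i).reverse) 0 (by omega)]
      rw [List.getElem_reverse]
      simp only [List.length_drop, hlen]
      rw [List.getElem_drop]
      rw [List.getD_eq_getElem L 0 h5]
      congr 1
      omega
    have hget22 : PySem.List.pyGetD ((L.drop i).reverse) (23 - 1) 0 = L.getD i 0 := by
      rw [show ((23 : Int) - 1) = ((22 : Nat) : Int) from by norm_num,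
        PySem.List.pyGetD_natCast]
      rw [List.getD_eq_getElem ((L.drop i).reverse) 0 (by omega)]
      rw [List.getElem_reverse]
      simp only [List.length_drop, hlen]
      rw [List.getElem_drop]
      rw [List.getD_eq_getElem L 0 h0]
      congr 1
      omega
    have hvv : PySem.Int.bxor (PySem.Int.bxor (L.getD (i + 5) 0) (L.getD i 0)) b = v := by
      rw [bxor_rotate, hv]
    have htail : (L.drop i).reverse.dropLast = (L.drop (i + 1)).reverse := by
      cases hd : L.drop i with
      | nil => rw [hd] at hFlen; simp at hFlen
      | cons a t =>
        have h1 : (L.drop i).tail = L.drop (i + 1) := List.tail_drop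
        rw [hd] at h1
        simp only [List.tail_cons] at h1
        rw [← h1]
        simp
    have hframe : v :: (L.drop i).reverse.dropLast = ((L ++ [v]).drop (i + 1)).reverse := by
      rw [htail, List.drop_append_of_le_length (by omega), List.reverse_append,
        List.reverse_singleton]
      rfl
    have hstep : scramStepA ((L.drop i).reverse, out) b
        = (((L ++ [v]).drop (i + 1)).reverse, out ++ [v]) := by
      show (PySem.Int.bxor _ b :: ((L.drop i).reverse).dropLast,
              out ++ [PySem.Int.bxor _ b]) = _
      rw [if_pos (by norm_num), hget17, hget22, hvv, hframe]
    have hstepB : scramStepB (i, out, L) b = (i + 1, out ++ [v], L ++ [v]) := by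
      simp only [scramStepB]
      rw [hv]
    rw [List.foldl_cons, List.foldl_cons, hstep, hstepB]
    exact ih (i + 1) (L ++ [v]) (out ++ [v])
      (by simp only [List.length_append, List.length_cons, List.length_nil, hlen]; omega)

-- ===== VERDICT (by name: the statement is the Claim_ definition above) =====
theorem scram_V34_spec : Claim_equal_scram_V34 := by
  intro bits _
  unfold Spec_scram_V34
  have h := loop_eq bits 0
    [1, 0, 1, 1, 0, 1, 0, 1, 0, 0, 0, 0, 1, 0, 0, 1, 0, 0, 0, 1, 0, 0, 1] [] (by rfl)
  exact h
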